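-- pv_equiv track=rewrite | github.com/kiseoky/Algorithms | programmers/택배배달과 수거하기.py | solution
-- ===== SOURCE A (Python) =====
-- def solution(cap, n, d, p):
--     answer = 0
--
--     d_cap, p_cap = 0, 0
--     for i in range(n - 1, -1, -1):
--         while d[i] > 0 or p[i] > 0:
--             if d[i] > d_cap or p[i] > p_cap:
--                 d_cap += cap
--                 p_cap += cap
--                 answer += (i + 1) * 2
--
--             d_now = min(d[i], d_cap)
--             d[i] -= d_now
--             d_cap -= d_now
--
--             p_now = min(p[i], p_cap)
--             p[i] -= p_now
--             p_cap -= p_now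
--
--     return answer
-- ===== SOURCE B (Python) =====
-- def solution(cap, n, d, p):
--     def ceildiv(x, c):
--         return -((-x) // c)
--
--     answer = 0
--     d_cap, p_cap = 0, 0
--     for i in range(n - 1, -1, -1):
--         di, pi = d[i], p[i]
--         if di > 0 or pi > 0:
--             t = max(0, ceildiv(di - d_cap, cap), ceildiv(pi - p_cap, cap))
--             answer += t * (i + 1) * 2
--             d_cap += t * cap - di
--             p_cap += t * cap - pi
--     return answer
-- ===== Notes on version B (the rewrite author's own statement) =====
-- stated objective: faster
-- what changed: A simulates truck trips one capacity-chunk at a time in an inner while loop; B computes the number of trips per house in closed form by ceiling division on the outstanding delivery/pickup loads, carrying the leftover capacities, so the inner loop disappears.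
-- outside the precondition, e.g. on solution(0, 1, [1], [0]): A does not finish within the time limit, B raises ZeroDivisionError
import Mathlib
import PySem

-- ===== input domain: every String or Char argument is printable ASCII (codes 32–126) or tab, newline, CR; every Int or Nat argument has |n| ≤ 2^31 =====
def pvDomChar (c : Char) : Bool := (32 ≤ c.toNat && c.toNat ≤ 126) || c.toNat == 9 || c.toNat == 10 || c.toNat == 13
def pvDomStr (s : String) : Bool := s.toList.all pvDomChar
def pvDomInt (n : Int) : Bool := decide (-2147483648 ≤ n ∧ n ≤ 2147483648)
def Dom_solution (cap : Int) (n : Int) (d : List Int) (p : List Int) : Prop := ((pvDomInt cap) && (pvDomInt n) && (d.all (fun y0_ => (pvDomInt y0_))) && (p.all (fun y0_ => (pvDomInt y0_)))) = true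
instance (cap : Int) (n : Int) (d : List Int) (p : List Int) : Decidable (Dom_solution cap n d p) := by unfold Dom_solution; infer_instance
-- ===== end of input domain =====

-- B replaces A's truck-by-truck inner while loop by a closed-form ceiling-division trip count per
-- house (faster when loads are large relative to cap). A mutates d and p in place (zeroes their
-- first n entries); B does not — the equivalence proved here is about the return value only.

-- ===== PORT A =====
-- the inner 'while d[i] > 0 or p[i] > 0' loop; fuel only makes it total (inside Pre_ the loop
-- always terminates before the fuel runs out, see solLoop_eq below); state result is (ans, d_cap, p_cap)
def solLoop (fuel : Nat) (cap i di pi dcap pcap ans : Int) : Int × Int × Int :=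
  match fuel with
  | 0 => (ans, dcap, pcap)
  | Nat.succ f =>
    if di > 0 ∨ pi > 0 then
      let dcap1 := if di > dcap ∨ pi > pcap then dcap + cap else dcap
      let pcap1 := if di > dcap ∨ pi > pcap then pcap + cap else pcap
      let ans1 := if di > dcap ∨ pi > pcap then ans + (i + 1) * 2 else ans
      let dnow := min di dcap1
      let pnow := min pi pcap1
      solLoop f cap i (di - dnow) (pi - pnow) (dcap1 - dnow) (pcap1 - pnow) ans1
    else (ans, dcap, pcap)

def stepA (cap : Int) (d p : List Int) (st : Int × Int × Int) (i : Int) : Int × Int × Int :=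
  let di := PySem.List.pyGetD d i 0
  let pi := PySem.List.pyGetD p i 0
  solLoop (di.natAbs + pi.natAbs + 1) cap i di pi st.2.1 st.2.2 st.1

def solution (cap : Int) (n : Int) (d : List Int) (p : List Int) : Int :=
  ((PySem.List.pyRange (n - 1) (-1) (-1)).foldl (stepA cap d p) (0, 0, 0)).1

-- ===== PORT B =====
-- ceildiv(x, c) = -((-x) // c)
def pvCeildiv (x c : Int) : Int := -(PySem.Int.floordiv (-x) c)

def stepB (cap : Int) (d p : List Int) (st : Int × Int × Int) (i : Int) : Int × Int × Int :=
  let di := PySem.List.pyGetD d i 0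
  let pi := PySem.List.pyGetD p i 0
  if di > 0 ∨ pi > 0 then
    let t := max (max 0 (pvCeildiv (di - st.2.1) cap)) (pvCeildiv (pi - st.2.2) cap)
    (st.1 + t * (i + 1) * 2, st.2.1 + t * cap - di, st.2.2 + t * cap - pi)
  else st

def solution_alt (cap : Int) (n : Int) (d : List Int) (p : List Int) : Int :=
  ((PySem.List.pyRange (n - 1) (-1) (-1)).foldl (stepB cap d p) (0, 0, 0)).1

-- ===== PRECONDITION & SPEC =====
-- Pre_ admits exactly the inputs on which the Python A returns: the first n entries of d and p must
-- exist (else IndexError), and cap must be positive unless all those entries are non-positive —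
-- with cap ≤ 0 and any positive load among them A loops forever.
def Pre_solution (cap : Int) (n : Int) (d : List Int) (p : List Int) : Prop :=
  n ≤ (d.length : Int) ∧ n ≤ (p.length : Int) ∧
    (0 < cap ∨ ∀ k : Nat, k < n.toNat → d.getD k 0 ≤ 0 ∧ p.getD k 0 ≤ 0)
instance (cap : Int) (n : Int) (d : List Int) (p : List Int) : Decidable (Pre_solution cap n d p) := by unfold Pre_solution; infer_instance

def pvWitness_solution : Int × Int × List Int × List Int := (4, 2, [1, 0], [0, 3])

def Spec_solution (cap : Int) (n : Int) (d : List Int) (p : List Int) (out : Int) : Prop := out = solution_alt cap n d p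
instance (cap : Int) (n : Int) (d : List Int) (p : List Int) (out : Int) : Decidable (Spec_solution cap n d p out) := by unfold Spec_solution; infer_instance

-- ===== CLAIM (what is proved, stated in full; the proofs are below) =====
def Claim_equal_solution : Prop := ∀ (cap : Int) (n : Int) (d : List Int) (p : List Int), Dom_solution cap n d p → Pre_solution cap n d p → Spec_solution cap n d p (solution cap n d p)


-- ===== LEMMAS AND PROOFS =====

theorem ceil_bracket (x c : Int) (hc : 1 ≤ c) :
    (pvCeildiv x c - 1) * c < x ∧ x ≤ pvCeildiv x c * c := by
  exact (PySem.Int.neg_floordiv_neg_eq_iff_of_pos (a := x) (b := c)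
      (q := pvCeildiv x c) (by omega)).mp rfl

theorem ceil_shift (x c : Int) (hc : 1 ≤ c) :
    pvCeildiv (x - c) c = pvCeildiv x c - 1 := by
  have h := ceil_bracket x c hc
  refine (PySem.Int.neg_floordiv_neg_eq_iff_of_pos (a := x - c) (b := c)
      (q := pvCeildiv x c - 1) (by omega)).mpr ⟨?_, ?_⟩
  · nlinarith [h.1]
  · nlinarith [h.2]

theorem ceil_nonpos (x c : Int) (hc : 1 ≤ c) (hx : x ≤ 0) : pvCeildiv x c ≤ 0 := by
  have h := (ceil_bracket x c hc).1
  by_contra hlt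
  push Not at hlt
  nlinarith

theorem ceil_pos (x c : Int) (hc : 1 ≤ c) (hx : 0 < x) : 1 ≤ pvCeildiv x c := by
  have h := (ceil_bracket x c hc).2
  by_contra hlt
  push Not at hlt
  nlinarith

theorem ceil_le_one (x c : Int) (hc : 1 ≤ c) (hx : x ≤ c) : pvCeildiv x c ≤ 1 := by
  have h := (ceil_bracket x c hc).1
  by_contra hlt
  push Not at hlt
  nlinarith

theorem solLoop_skip (f : Nat) (cap i di pi dcap pcap ans : Int)
    (hent : ¬(di > 0 ∨ pi > 0)) :
    solLoop (f + 1) cap i di pi dcap pcap ans = (ans, dcap, pcap) := by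
  simp only [solLoop, if_neg hent]

-- the closed form of A's inner while loop, by induction on the fuel
theorem solLoop_eq (cap : Int) (hc : 1 ≤ cap) : ∀ (fuel : Nat) (i di pi dcap pcap ans : Int),
    0 ≤ dcap → 0 ≤ pcap → di.natAbs + pi.natAbs < fuel →
    solLoop fuel cap i di pi dcap pcap ans =
      (if di > 0 ∨ pi > 0 then
        (ans + (max (max 0 (pvCeildiv (di - dcap) cap)) (pvCeildiv (pi - pcap) cap)) * (i + 1) * 2,
         dcap + (max (max 0 (pvCeildiv (di - dcap) cap)) (pvCeildiv (pi - pcap) cap)) * cap - di,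
         pcap + (max (max 0 (pvCeildiv (di - dcap) cap)) (pvCeildiv (pi - pcap) cap)) * cap - pi)
      else (ans, dcap, pcap)) := by
  intro fuel
  induction fuel with
  | zero => intro i di pi dcap pcap ans _ _ hf; omega
  | succ f ih =>
    intro i di pi dcap pcap ans hd hp hf
    by_cases hent : di > 0 ∨ pi > 0
    · rw [if_pos hent]
      by_cases hshort : di > dcap ∨ pi > pcap
      · -- a new truck is sent: one loop iteration, then the state shifts by cap
        simp only [solLoop, if_pos hent, if_pos hshort]
        rw [ih i (di - min di (dcap + cap)) (pi - min pi (pcap + cap))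
            (dcap + cap - min di (dcap + cap)) (pcap + cap - min pi (pcap + cap))
            (ans + (i + 1) * 2) (by omega) (by omega) (by omega)]
        have e1 : di - min di (dcap + cap) - (dcap + cap - min di (dcap + cap)) = di - dcap - cap := by
          ring
        have e2 : pi - min pi (pcap + cap) - (pcap + cap - min pi (pcap + cap)) = pi - pcap - cap := by
          ring
        rw [e1, e2, ceil_shift _ _ hc, ceil_shift _ _ hc]
        have hbD := ceil_bracket (di - dcap) cap hc
        have hbP := ceil_bracket (pi - pcap) cap hc
        have ht1 : 1 ≤ pvCeildiv (di - dcap) cap ∨ 1 ≤ pvCeildiv (pi - pcap) cap := by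
          rcases hshort with h | h
          · exact Or.inl (ceil_pos _ _ hc (by omega))
          · exact Or.inr (ceil_pos _ _ hc (by omega))
        split_ifs with hent2
        · -- the loop goes on: trip counts differ by exactly one
          have hmax : max (max 0 (pvCeildiv (di - dcap) cap - 1)) (pvCeildiv (pi - pcap) cap - 1) =
              max (max 0 (pvCeildiv (di - dcap) cap)) (pvCeildiv (pi - pcap) cap) - 1 := by omega
          rw [hmax]
          simp only [Prod.mk.injEq]
          refine ⟨by ring, by ring, by ring⟩
        · -- the loop ends after this iteration: exactly one truck was needed
          push Not at hent2
          have hdn : min di (dcap + cap) = di := by omega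
          have hpn : min pi (pcap + cap) = pi := by omega
          have htD : pvCeildiv (di - dcap) cap ≤ 1 := ceil_le_one _ _ hc (by omega)
          have htP : pvCeildiv (pi - pcap) cap ≤ 1 := ceil_le_one _ _ hc (by omega)
          have hT : max (max 0 (pvCeildiv (di - dcap) cap)) (pvCeildiv (pi - pcap) cap) = 1 := by
            omega
          rw [hT, hdn, hpn]
          simp only [Prod.mk.injEq]
          refine ⟨by ring, by ring, by ring⟩
      · -- capacity already suffices: the loads drain fully, no truck is added
        simp only [solLoop, if_pos hent, if_neg hshort]
        push Not at hshort
        have hdn : min di dcap = di := by omega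
        have hpn : min pi pcap = pi := by omega
        rw [hdn, hpn]
        rw [ih i (di - di) (pi - pi) (dcap - di) (pcap - pi) ans (by omega) (by omega) (by omega)]
        have htD : pvCeildiv (di - dcap) cap ≤ 0 := ceil_nonpos _ _ hc (by omega)
        have htP : pvCeildiv (pi - pcap) cap ≤ 0 := ceil_nonpos _ _ hc (by omega)
        have hT : max (max 0 (pvCeildiv (di - dcap) cap)) (pvCeildiv (pi - pcap) cap) = 0 := by omega
        rw [if_neg (by omega), hT]
        simp only [Prod.mk.injEq]
        refine ⟨by ring, by ring, by ring⟩
    · rw [if_neg hent]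
      exact solLoop_skip f cap i di pi dcap pcap ans hent

theorem stepAB (cap : Int) (hc : 1 ≤ cap) (d p : List Int) (st : Int × Int × Int) (i : Int)
    (hd : 0 ≤ st.2.1) (hp : 0 ≤ st.2.2) :
    stepA cap d p st i = stepB cap d p st i := by
  simp only [stepA, stepB]
  rw [solLoop_eq cap hc _ i _ _ _ _ _ hd hp (by omega)]

theorem stepB_inv (cap : Int) (hc : 1 ≤ cap) (d p : List Int) (st : Int × Int × Int) (i : Int)
    (hd : 0 ≤ st.2.1) (hp : 0 ≤ st.2.2) :
    0 ≤ (stepB cap d p st i).2.1 ∧ 0 ≤ (stepB cap d p st i).2.2 := by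
  simp only [stepB]
  split_ifs with h
  · have hbD := (ceil_bracket (PySem.List.pyGetD d i 0 - st.2.1) cap hc).2
    have hbP := (ceil_bracket (PySem.List.pyGetD p i 0 - st.2.2) cap hc).2
    have hle1 : pvCeildiv (PySem.List.pyGetD d i 0 - st.2.1) cap ≤
        max (max 0 (pvCeildiv (PySem.List.pyGetD d i 0 - st.2.1) cap))
          (pvCeildiv (PySem.List.pyGetD p i 0 - st.2.2) cap) := by omega
    have hle2 : pvCeildiv (PySem.List.pyGetD p i 0 - st.2.2) cap ≤
        max (max 0 (pvCeildiv (PySem.List.pyGetD d i 0 - st.2.1) cap))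
          (pvCeildiv (PySem.List.pyGetD p i 0 - st.2.2) cap) := by omega
    have hm1 := mul_le_mul_of_nonneg_right hle1 (by omega : (0:Int) ≤ cap)
    have hm2 := mul_le_mul_of_nonneg_right hle2 (by omega : (0:Int) ≤ cap)
    refine ⟨?_, ?_⟩ <;> dsimp only
    · linarith
    · linarith
  · exact ⟨hd, hp⟩

theorem fold_eq (cap : Int) (hc : 1 ≤ cap) (d p : List Int) :
    ∀ (l : List Int) (st : Int × Int × Int), 0 ≤ st.2.1 → 0 ≤ st.2.2 →
      l.foldl (stepA cap d p) st = l.foldl (stepB cap d p) st := by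
  intro l
  induction l with
  | nil => intro st _ _; rfl
  | cons x xs ih =>
    intro st hd hp
    simp only [List.foldl_cons]
    rw [stepAB cap hc d p st x hd hp]
    exact ih _ (stepB_inv cap hc d p st x hd hp).1 (stepB_inv cap hc d p st x hd hp).2

theorem fold_id {α β : Type} (step : β → α → β) :
    ∀ (l : List α) (st : β), (∀ st' x, x ∈ l → step st' x = st') → l.foldl step st = st := by
  intro l
  induction l with
  | nil => intro st _; rfl
  | cons x xs ih =>
    intro st h
    simp only [List.foldl_cons]
    rw [h st x (by simp)]
    exact ih st (fun st' y hy => h st' y (by simp [hy]))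

-- ===== VERDICT (by name: the statement is the Claim_ definition above) =====
theorem solution_spec : Claim_equal_solution := by
  intro cap n d p _ hpre
  unfold Spec_solution solution solution_alt
  rcases hpre with ⟨hdl, hpl, hcap | htriv⟩
  · rw [fold_eq cap (by omega) d p _ _ (by norm_num) (by norm_num)]
  · -- cap may be non-positive, but every load among the first n is non-positive:
    -- neither program ever enters its per-house branch
    have hkey : ∀ (i : Int), i ∈ PySem.List.pyRange (n - 1) (-1) (-1) →
        PySem.List.pyGetD d i 0 ≤ 0 ∧ PySem.List.pyGetD p i 0 ≤ 0 := by
      intro i hi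
      rw [PySem.List.mem_pyRange_neg_one] at hi
      have h0 : (0:Int) ≤ i := by omega
      have hk : i.toNat < n.toNat := by omega
      have := htriv i.toNat hk
      rw [PySem.List.pyGetD_of_nonneg d 0 h0, PySem.List.pyGetD_of_nonneg p 0 h0]
      exact this
    have hA : ∀ (st : Int × Int × Int) (i : Int), i ∈ PySem.List.pyRange (n - 1) (-1) (-1) →
        stepA cap d p st i = st := by
      intro st i hi
      have h := hkey i hi
      have hent : ¬(PySem.List.pyGetD d i 0 > 0 ∨ PySem.List.pyGetD p i 0 > 0) := by omega
      simp only [stepA]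
      rw [solLoop_skip _ cap i _ _ _ _ _ hent]
    have hB : ∀ (st : Int × Int × Int) (i : Int), i ∈ PySem.List.pyRange (n - 1) (-1) (-1) →
        stepB cap d p st i = st := by
      intro st i hi
      have h := hkey i hi
      have hent : ¬(PySem.List.pyGetD d i 0 > 0 ∨ PySem.List.pyGetD p i 0 > 0) := by omega
      simp only [stepB, if_neg hent]
    rw [fold_id (stepA cap d p) _ _ (fun st i hi => hA st i hi),
      fold_id (stepB cap d p) _ _ (fun st i hi => hB st i hi)]
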